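-- pv_equiv track=rewrite | github.com/pythonkr/backend | .github/scripts/update_ssm_parameter_store.py | get_parameter_diff
-- ===== SOURCE A (Python) =====
-- import typing
--
-- class ValueDiff(typing.NamedTuple):
--     old: str | None
--     new: str | None
--
-- class ParameterDiffCollection(typing.NamedTuple):
--     updated: dict[str, ValueDiff]
--     created: dict[str, ValueDiff]
--     deleted: dict[str, ValueDiff]
--
-- def get_parameter_diff(old_parameters: dict[str, str], new_parameters: dict[str, str]) -> ParameterDiffCollection:
--     created, updated, deleted = {}, {}, {}
--
--     for fields in old_parameters.keys() | new_parameters.keys():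
--         value = ValueDiff(old=old_parameters.get(fields), new=new_parameters.get(fields))
--         if value.old != value.new:
--             if value.old is None:
--                 created[fields] = value
--             elif value.new is None:
--                 deleted[fields] = value
--             else:
--                 updated[fields] = value
--
--     return ParameterDiffCollection(updated=updated, created=created, deleted=deleted)
-- ===== SOURCE B (Python) =====
-- import typing
--
-- class ValueDiff(typing.NamedTuple):
--     old: str | None
--     new: str | None
--
-- class ParameterDiffCollection(typing.NamedTuple):
--     updated: dict[str, ValueDiff]
--     created: dict[str, ValueDiff]
--     deleted: dict[str, ValueDiff]
--
-- def get_parameter_diff(old_parameters: dict[str, str], new_parameters: dict[str, str]) -> ParameterDiffCollection: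
--     updated, deleted = {}, {}
--     for k, v in old_parameters.items():
--         new_v = new_parameters.get(k)
--         if new_v is None:
--             deleted[k] = ValueDiff(old=v, new=None)
--         elif new_v != v:
--             updated[k] = ValueDiff(old=v, new=new_v)
--     created = {k: ValueDiff(old=None, new=v)
--                for k, v in new_parameters.items() if k not in old_parameters}
--     return ParameterDiffCollection(updated=updated, created=created, deleted=deleted)
-- ===== Notes on version B (the rewrite author's own statement) =====
-- stated objective: alternative
-- what changed: Replaces A's single pass over the union of the two key sets (with a three-way value-based classification per key) by two direct passes: one over old items classifying each key as deleted or updated by looking it up in the new dict, and one comprehension over new items collecting keys absent from the old dict as created; no key-set union is built.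
import Mathlib
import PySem

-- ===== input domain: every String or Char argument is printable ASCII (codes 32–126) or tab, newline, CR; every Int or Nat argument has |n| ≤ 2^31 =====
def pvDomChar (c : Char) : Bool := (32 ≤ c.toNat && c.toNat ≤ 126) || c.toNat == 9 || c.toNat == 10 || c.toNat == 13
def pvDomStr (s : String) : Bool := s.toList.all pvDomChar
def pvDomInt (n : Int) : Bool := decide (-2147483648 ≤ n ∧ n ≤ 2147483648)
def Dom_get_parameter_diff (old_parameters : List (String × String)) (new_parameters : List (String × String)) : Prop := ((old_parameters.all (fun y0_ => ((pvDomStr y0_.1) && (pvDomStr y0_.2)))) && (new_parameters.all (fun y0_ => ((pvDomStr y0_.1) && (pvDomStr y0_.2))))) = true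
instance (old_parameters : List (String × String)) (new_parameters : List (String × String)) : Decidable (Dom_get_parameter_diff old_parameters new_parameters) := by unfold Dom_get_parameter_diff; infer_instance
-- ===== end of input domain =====

-- B replaces A's single pass over the union of the two key sets by two direct passes
-- (old items classify updated/deleted; new-only items give created): alternative decomposition, same cost.
-- A iterates a Python set (hash order); the returned dicts are compared ignoring order,
-- and the port fixes the iteration order to old-keys-then-new-only-keys.


-- ===== PORT A =====
-- the body of A's single loop (named so the proofs can talk about it)
def pvStepA (od nd : PySem.Dict String String)
    (acc : PySem.Dict String (Option String × Option String) × PySem.Dict String (Option String × Option String) × PySem.Dict String (Option String × Option String))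
    (fields : String) :
    PySem.Dict String (Option String × Option String) × PySem.Dict String (Option String × Option String) × PySem.Dict String (Option String × Option String) :=
  let (created, updated, deleted) := acc
  let vold := od.get? fields   -- value = ValueDiff(old=…, new=…)
  let vnew := nd.get? fields
  if vold ≠ vnew then
    if vold = none then (created.insert fields (vold, vnew), updated, deleted)
    else if vnew = none then (created, updated, deleted.insert fields (vold, vnew))
    else (created, updated.insert fields (vold, vnew), deleted)
  else acc

def get_parameter_diff (old_parameters : List (String × String)) (new_parameters : List (String × String)) : (List (String × Option String × Option String)) × (List (String × Option String × Option String)) × (List (String × Option String × Option String)) :=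
  let od := PySem.Dict.ofList old_parameters
  let nd := PySem.Dict.ofList new_parameters
  -- old_parameters.keys() | new_parameters.keys(): a Python set, iterated in hash order;
  -- the port iterates it old-keys-then-new-only-keys (the result dicts are order-insensitive)
  let ks : PySem.Set String := PySem.Set.union (PySem.Set.ofList (PySem.Dict.keys od)) (PySem.Dict.keys nd)
  let acc := ks.foldl (pvStepA od nd) (PySem.Dict.empty, PySem.Dict.empty, PySem.Dict.empty)
  (acc.2.1.items, acc.1.items, acc.2.2.items)

-- ===== PORT B =====
-- body of B's first loop (over old items): classify deleted / updated
def pvStepB1 (nd : PySem.Dict String String)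
    (acc : PySem.Dict String (Option String × Option String) × PySem.Dict String (Option String × Option String))
    (kv : String × String) :
    PySem.Dict String (Option String × Option String) × PySem.Dict String (Option String × Option String) :=
  match nd.get? kv.1 with
  | none => (acc.1, acc.2.insert kv.1 (some kv.2, none))
  | some new_v => if new_v ≠ kv.2 then (acc.1.insert kv.1 (some kv.2, some new_v), acc.2) else acc

-- body of B's created comprehension (over new items): keys not in the old dict
def pvStepB2 (od : PySem.Dict String String)
    (c : PySem.Dict String (Option String × Option String)) (kv : String × String) :
    PySem.Dict String (Option String × Option String) :=
  if od.contains kv.1 then c else c.insert kv.1 (none, some kv.2)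

def get_parameter_diff_alt (old_parameters : List (String × String)) (new_parameters : List (String × String)) : (List (String × Option String × Option String)) × (List (String × Option String × Option String)) × (List (String × Option String × Option String)) :=
  let od := PySem.Dict.ofList old_parameters
  let nd := PySem.Dict.ofList new_parameters
  let ud := od.items.foldl (pvStepB1 nd) (PySem.Dict.empty, PySem.Dict.empty)
  let created := nd.items.foldl (pvStepB2 od) PySem.Dict.empty
  (ud.1.items, created.items, ud.2.items)

-- ===== PRECONDITION & SPEC =====
def Spec_get_parameter_diff (old_parameters : List (String × String)) (new_parameters : List (String × String)) (out : (List (String × Option String × Option String)) × (List (String × Option String × Option String)) × (List (String × Option String × Option String))) : Prop := out = get_parameter_diff_alt old_parameters new_parameters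
instance (old_parameters : List (String × String)) (new_parameters : List (String × String)) (out : (List (String × Option String × Option String)) × (List (String × Option String × Option String)) × (List (String × Option String × Option String))) : Decidable (Spec_get_parameter_diff old_parameters new_parameters out) := by unfold Spec_get_parameter_diff; infer_instance

-- ===== CLAIM (what is proved, stated in full; the proofs are below) =====
def Claim_equal_get_parameter_diff : Prop := ∀ (old_parameters : List (String × String)) (new_parameters : List (String × String)), Dom_get_parameter_diff old_parameters new_parameters → Spec_get_parameter_diff old_parameters new_parameters (get_parameter_diff old_parameters new_parameters)

-- ===== LEMMAS AND PROOFS =====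

-- A's step on a key of the old dict acts exactly like B's first-loop step (created untouched)
theorem pvStepA_old (od nd : PySem.Dict String String)
    (c u d : PySem.Dict String (Option String × Option String))
    (kv : String × String) (hkv : od.get? kv.1 = some kv.2) :
    pvStepA od nd (c, u, d) kv.1 = (c, pvStepB1 nd (u, d) kv) := by
  unfold pvStepA pvStepB1
  cases hnd : nd.get? kv.1 with
  | none => simp [hkv]
  | some nv =>
    by_cases hv : nv = kv.2
    · simp [hkv, hv]
    · simp [hkv, hv, Ne.symm hv]

-- A's step on a key absent from the old dict inserts into created (updated/deleted untouched)
theorem pvStepA_new (od nd : PySem.Dict String String)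
    (c : PySem.Dict String (Option String × Option String))
    (ud : PySem.Dict String (Option String × Option String) × PySem.Dict String (Option String × Option String))
    (kv : String × String) (h1 : od.get? kv.1 = none) (h2 : nd.get? kv.1 = some kv.2) :
    pvStepA od nd (c, ud) kv.1 = (c.insert kv.1 (none, some kv.2), ud) := by
  unfold pvStepA
  simp [h1, h2]

-- phase 1: A's loop over the old keys is B's loop over the old items
theorem pv_phase1 (od nd : PySem.Dict String String)
    (l : List (String × String)) (hl : ∀ kv ∈ l, od.get? kv.1 = some kv.2)
    (c u d : PySem.Dict String (Option String × Option String)) :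
    (l.map Prod.fst).foldl (pvStepA od nd) (c, u, d) = (c, l.foldl (pvStepB1 nd) (u, d)) := by
  induction l generalizing u d with
  | nil => simp
  | cons kv rest ih =>
    simp only [List.map_cons, List.foldl_cons]
    rw [pvStepA_old od nd c u d kv (hl kv List.mem_cons_self)]
    exact ih (fun x hx => hl x (List.mem_cons_of_mem _ hx))
      (pvStepB1 nd (u, d) kv).1 (pvStepB1 nd (u, d) kv).2

-- phase 2: A's loop over the new-only keys is B's created loop
theorem pv_phase2 (od nd : PySem.Dict String String)
    (l : List (String × String)) (hl : ∀ kv ∈ l, nd.get? kv.1 = some kv.2 ∧ od.get? kv.1 = none)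
    (c : PySem.Dict String (Option String × Option String))
    (ud : PySem.Dict String (Option String × Option String) × PySem.Dict String (Option String × Option String)) :
    (l.map Prod.fst).foldl (pvStepA od nd) (c, ud)
    = (l.foldl (fun c kv => c.insert kv.1 (none, some kv.2)) c, ud) := by
  induction l generalizing c with
  | nil => simp
  | cons kv rest ih =>
    simp only [List.map_cons, List.foldl_cons]
    rw [pvStepA_new od nd c ud kv (hl kv List.mem_cons_self).2 (hl kv List.mem_cons_self).1]
    exact ih (fun x hx => hl x (List.mem_cons_of_mem _ hx)) _

-- ===== VERDICT (by name: the statement is the Claim_ definition above) =====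
theorem get_parameter_diff_spec : Claim_equal_get_parameter_diff := by
  intro old_parameters new_parameters _
  unfold Spec_get_parameter_diff
  simp only [get_parameter_diff, get_parameter_diff_alt]
  have hno : (PySem.Dict.ofList old_parameters).keys.Nodup := PySem.Dict.nodup_keys_ofList _
  have hnn : (PySem.Dict.ofList new_parameters).keys.Nodup := PySem.Dict.nodup_keys_ofList _
  have hks : PySem.Set.union (PySem.Set.ofList (PySem.Dict.keys (PySem.Dict.ofList old_parameters))) (PySem.Dict.keys (PySem.Dict.ofList new_parameters))
      = (PySem.Dict.ofList old_parameters).items.map Prod.fst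
        ++ ((PySem.Dict.ofList new_parameters).items.filter
              (fun kv => !(PySem.Dict.ofList old_parameters).contains kv.1)).map Prod.fst := by
    rw [show PySem.Set.union (PySem.Set.ofList (PySem.Dict.keys (PySem.Dict.ofList old_parameters))) (PySem.Dict.keys (PySem.Dict.ofList new_parameters))
        = PySem.Set.update (PySem.Set.ofList (PySem.Dict.keys (PySem.Dict.ofList old_parameters))) (PySem.Dict.keys (PySem.Dict.ofList new_parameters)) from rfl]
    rw [PySem.Set.update_eq_append_filter, PySem.Set.ofList_eq_self_of_nodup _ hno,
        PySem.Set.ofList_eq_self_of_nodup _ hnn]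
    congr 1
    rw [show PySem.Dict.keys (PySem.Dict.ofList new_parameters)
        = (PySem.Dict.ofList new_parameters).items.map Prod.fst from rfl, List.filter_map]
    congr 1
    apply List.filter_congr
    intro x _
    simp [Function.comp, PySem.Dict.contains_eq_decide_mem_keys]
  have hlo : ∀ kv ∈ (PySem.Dict.ofList old_parameters).items,
      (PySem.Dict.ofList old_parameters).get? kv.1 = some kv.2 := fun kv h =>
    PySem.Dict.get?_of_mem_items _ h hno
  have hln : ∀ kv ∈ ((PySem.Dict.ofList new_parameters).items.filter
        (fun kv => !(PySem.Dict.ofList old_parameters).contains kv.1)),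
      (PySem.Dict.ofList new_parameters).get? kv.1 = some kv.2
        ∧ (PySem.Dict.ofList old_parameters).get? kv.1 = none := by
    intro kv h
    have hm := List.mem_filter.mp h
    refine ⟨PySem.Dict.get?_of_mem_items _ hm.1 hnn, ?_⟩
    rw [PySem.Dict.get?_eq_none_iff_not_mem_keys]
    intro hk
    have := (PySem.Dict.contains_iff_mem_keys _ _).mpr hk
    simp [this] at hm
  have hcre : (PySem.Dict.ofList new_parameters).items.foldl
        (pvStepB2 (PySem.Dict.ofList old_parameters)) PySem.Dict.empty
      = ((PySem.Dict.ofList new_parameters).items.filter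
          (fun kv => !(PySem.Dict.ofList old_parameters).contains kv.1)).foldl
          (fun c kv => c.insert kv.1 (none, some kv.2)) PySem.Dict.empty := by
    rw [List.foldl_filter]
    congr 1
    funext x y
    simp only [pvStepB2]
    cases (PySem.Dict.ofList old_parameters).contains y.1 <;> simp
  rw [hks, List.foldl_append,
      pv_phase1 (PySem.Dict.ofList old_parameters) (PySem.Dict.ofList new_parameters) _ hlo,
      pv_phase2 (PySem.Dict.ofList old_parameters) (PySem.Dict.ofList new_parameters) _ hln,
      hcre]
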